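-- pv_equiv track=rewrite | github.com/DenissK20/Graph_Isomorphism | colorref.py | are_equivalent
-- ===== SOURCE A (Python) =====
-- def are_equivalent(v1: dict, v2: dict) -> bool:
--   l1 = len(v1)
--   l2 = len(v2)
--   i = 0 # should be l1 by the end
--
--   # false if different number of colours
--   if l1 != l2:
--     return False
--
--   # for each colour there must be the same number of vertices
--   for c1 in v1: # colour 1
--     for c2 in v2: # colour 2
--       if c1 == c2:
--         if len(v1[c1]) == len(v2[c2]):
--           i += 1
--         else:
--           return False
--   # graph 1 and 2 have the same colours
--   return i == l1
-- ===== SOURCE B (Python) =====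
-- def are_equivalent(v1: dict, v2: dict) -> bool:
--   m1 = {c: len(vs) for c, vs in v1.items()}
--   m2 = {c: len(vs) for c, vs in v2.items()}
--   return m1 == m2
-- ===== Notes on version B (the rewrite author's own statement) =====
-- stated objective: simpler
-- what changed: Replaced A's nested key scan with running counter and early returns by building a colour->count table for each dict via a comprehension and comparing the two tables with a single dict equality.
import Mathlib
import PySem

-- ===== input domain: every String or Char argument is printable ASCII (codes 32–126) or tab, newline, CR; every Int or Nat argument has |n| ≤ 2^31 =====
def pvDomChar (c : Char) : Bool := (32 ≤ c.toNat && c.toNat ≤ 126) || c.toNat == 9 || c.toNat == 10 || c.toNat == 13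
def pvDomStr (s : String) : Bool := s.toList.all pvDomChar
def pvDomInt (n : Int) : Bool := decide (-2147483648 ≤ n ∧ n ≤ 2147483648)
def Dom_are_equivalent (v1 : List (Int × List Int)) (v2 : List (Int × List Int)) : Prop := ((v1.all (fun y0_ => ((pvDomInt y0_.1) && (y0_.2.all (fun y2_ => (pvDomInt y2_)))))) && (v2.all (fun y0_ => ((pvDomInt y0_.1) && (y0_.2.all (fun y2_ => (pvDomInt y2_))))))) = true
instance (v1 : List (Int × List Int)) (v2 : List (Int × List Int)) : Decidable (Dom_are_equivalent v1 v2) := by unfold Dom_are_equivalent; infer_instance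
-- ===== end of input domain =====

-- B replaces A's nested scan / running counter / early returns by two colour->count
-- tables compared with one dict equality (objective: simpler).

-- ===== PORT A =====
-- inner loop 'for c2 in v2: …' — none = the 'return False' branch, some i = fall through with counter i
def aInner (d1 d2 : PySem.Dict Int (List Int)) (c1 : Int) : List Int → Int → Option Int
  | [], i => some i
  | c2 :: rest, i =>
    if c1 == c2 then
      if (d1.getD c1 []).length == (d2.getD c2 []).length then aInner d1 d2 c1 rest (i + 1)
      else none
    else aInner d1 d2 c1 rest i

-- outer loop 'for c1 in v1: …'
def aOuter (d1 d2 : PySem.Dict Int (List Int)) : List Int → Int → Option Int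
  | [], i => some i
  | c1 :: rest, i =>
    match aInner d1 d2 c1 d2.keys i with
    | none => none
    | some i' => aOuter d1 d2 rest i'

def are_equivalent (v1 : List (Int × List Int)) (v2 : List (Int × List Int)) : Bool :=
  let d1 := PySem.Dict.ofList v1
  let d2 := PySem.Dict.ofList v2
  let l1 : Int := d1.size
  let l2 : Int := d2.size
  if l1 != l2 then false
  else
    match aOuter d1 d2 d1.keys 0 with
    | none => false
    | some i => i == l1

-- ===== PORT B =====
-- dict comprehension {c: len(vs) for c, vs in v.items()}
def bTable (d : PySem.Dict Int (List Int)) : PySem.Dict Int Int :=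
  d.items.foldl (fun m p => m.insert p.1 (p.2.length : Int)) PySem.Dict.empty

-- Python's dict ==: same size and every item of m1 found in m2 (insertion order ignored)
def dictEq (m1 m2 : PySem.Dict Int Int) : Bool :=
  m1.size == m2.size && m1.items.all (fun p => m2.get? p.1 == some p.2)

def are_equivalent_alt (v1 : List (Int × List Int)) (v2 : List (Int × List Int)) : Bool :=
  dictEq (bTable (PySem.Dict.ofList v1)) (bTable (PySem.Dict.ofList v2))

-- ===== PRECONDITION & SPEC =====
def Spec_are_equivalent (v1 : List (Int × List Int)) (v2 : List (Int × List Int)) (out : Bool) : Prop := out = are_equivalent_alt v1 v2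
instance (v1 : List (Int × List Int)) (v2 : List (Int × List Int)) (out : Bool) : Decidable (Spec_are_equivalent v1 v2 out) := by unfold Spec_are_equivalent; infer_instance

-- ===== CLAIM (what is proved, stated in full; the proofs are below) =====
def Claim_equal_are_equivalent : Prop := ∀ (v1 : List (Int × List Int)) (v2 : List (Int × List Int)), Dom_are_equivalent v1 v2 → Spec_are_equivalent v1 v2 (are_equivalent v1 v2)

-- ===== LEMMAS AND PROOFS =====

theorem aInner_spec (d1 d2 : PySem.Dict Int (List Int)) (c1 : Int) (ks : List Int)
    (hnd : ks.Nodup) (i : Int) :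
    aInner d1 d2 c1 ks i =
      if c1 ∈ ks then
        (if (d1.getD c1 []).length = (d2.getD c1 []).length then some (i + 1) else none)
      else some i := by
  induction ks generalizing i with
  | nil => simp [aInner]
  | cons c2 rest ih =>
    rcases List.nodup_cons.mp hnd with ⟨hc, hrest⟩
    by_cases h : c1 = c2
    · subst h
      by_cases hl : (d1.getD c1 []).length = (d2.getD c1 []).length
      · simp [aInner, hl, ih hrest, hc]
      · simp [aInner, hl]
    · simp [aInner, h, ih hrest]

theorem aOuter_spec (d1 d2 : PySem.Dict Int (List Int)) (hnd2 : d2.keys.Nodup)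
    (ks : List Int) (i : Int) :
    aOuter d1 d2 ks i =
      if ∃ c ∈ ks, c ∈ d2.keys ∧ (d1.getD c []).length ≠ (d2.getD c []).length then none
      else some (i + (ks.filter (fun c => decide (c ∈ d2.keys))).length) := by
  induction ks generalizing i with
  | nil => simp [aOuter]
  | cons c rest ih =>
    simp only [aOuter, aInner_spec d1 d2 c d2.keys hnd2 i]
    by_cases hmem : c ∈ d2.keys
    · by_cases hlen : (d1.getD c []).length = (d2.getD c []).length
      · simp only [if_pos hmem, if_pos hlen]
        rw [ih]
        have hcond : (∃ x ∈ c :: rest, x ∈ d2.keys ∧ (d1.getD x []).length ≠ (d2.getD x []).length)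
            ↔ (∃ x ∈ rest, x ∈ d2.keys ∧ (d1.getD x []).length ≠ (d2.getD x []).length) := by
          constructor
          · rintro ⟨x, hx, hk, hl⟩
            rcases List.mem_cons.mp hx with rfl | hx'
            · exact absurd hlen hl
            · exact ⟨x, hx', hk, hl⟩
          · rintro ⟨x, hx, h⟩; exact ⟨x, List.mem_cons_of_mem _ hx, h⟩
        rw [List.filter_cons_of_pos (by simpa using hmem)]
        simp only [hcond]
        split_ifs
        · rfl
        · simp; ring
      · simp only [if_pos hmem, if_neg hlen]
        rw [if_pos ⟨c, List.mem_cons_self, hmem, hlen⟩]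
    · simp only [if_neg hmem]
      have hcond : (∃ x ∈ c :: rest, x ∈ d2.keys ∧ (d1.getD x []).length ≠ (d2.getD x []).length)
          ↔ (∃ x ∈ rest, x ∈ d2.keys ∧ (d1.getD x []).length ≠ (d2.getD x []).length) := by
        constructor
        · rintro ⟨x, hx, hk, hl⟩
          rcases List.mem_cons.mp hx with rfl | hx'
          · exact absurd hk hmem
          · exact ⟨x, hx', hk, hl⟩
        · rintro ⟨x, hx, h⟩; exact ⟨x, List.mem_cons_of_mem _ hx, h⟩
      rw [ih, List.filter_cons_of_neg (by simpa using hmem)]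
      simp only [hcond]

-- get? through a value-map of the underlying items list
theorem get?_mk_map {g : List Int → Int} (l : List (Int × List Int)) (c : Int) :
    (PySem.Dict.mk (l.map (fun p => (p.1, g p.2)))).get? c
      = ((PySem.Dict.mk l : PySem.Dict Int (List Int)).get? c).map g := by
  induction l with
  | nil => simp [PySem.Dict.get?]
  | cons p rest ih =>
    obtain ⟨k, v⟩ := p
    simp only [List.map_cons, PySem.Dict.get?_mk_cons]
    by_cases h : k == c
    · simp [h]
    · simp [h, ih]

theorem bTable_items (d : PySem.Dict Int (List Int)) (hnd : d.keys.Nodup) :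
    (bTable d).items = d.items.map (fun p => (p.1, (p.2.length : Int))) := by
  unfold bTable
  exact PySem.Dict.items_foldl_insert_fresh d.items (fun p => p.1) (fun p => (p.2.length : Int))
    PySem.Dict.empty (fun a _ => by simp) hnd

theorem bTable_get? (d : PySem.Dict Int (List Int)) (hnd : d.keys.Nodup) (c : Int) :
    (bTable d).get? c = (d.get? c).map (fun vs => (vs.length : Int)) := by
  have h1 : bTable d = PySem.Dict.mk (d.items.map (fun p => (p.1, (p.2.length : Int)))) := by
    apply PySem.Dict.ext; simp [bTable_items d hnd]
  rw [h1]
  exact get?_mk_map (g := fun vs : List Int => (vs.length : Int)) d.items c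

theorem bTable_size (d : PySem.Dict Int (List Int)) (hnd : d.keys.Nodup) :
    (bTable d).size = d.size := by
  simp [PySem.Dict.size, bTable_items d hnd]

-- the single common characterisation both programs decide
theorem bTable_all_iff (d1 d2 : PySem.Dict Int (List Int))
    (h1 : d1.keys.Nodup) (h2 : d2.keys.Nodup) :
    ((bTable d1).items.all (fun p => (bTable d2).get? p.1 == some p.2) = true)
      ↔ ∀ p ∈ d1.items, (d2.get? p.1).map (fun vs => (vs.length : Int)) = some (p.2.length : Int) := by
  rw [bTable_items d1 h1, List.all_eq_true]
  constructor
  · intro h p hp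
    have := h _ (List.mem_map_of_mem hp)
    simpa [bTable_get? d2 h2] using this
  · intro h q hq
    obtain ⟨p, hp, rfl⟩ := List.mem_map.mp hq
    simpa [bTable_get? d2 h2] using h p hp

theorem main_eq (d1 d2 : PySem.Dict Int (List Int)) (h1 : d1.keys.Nodup) (h2 : d2.keys.Nodup) :
    (if ((d1.size : Int) != (d2.size : Int)) then false
     else match aOuter d1 d2 d1.keys 0 with
       | none => false
       | some i => i == (d1.size : Int))
      = dictEq (bTable d1) (bTable d2) := by
  by_cases hsz : d1.size = d2.size
  · rw [if_neg (by simp [hsz])]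
    rw [aOuter_spec d1 d2 h2 d1.keys 0]
    by_cases hbad : ∃ c ∈ d1.keys, c ∈ d2.keys ∧ (d1.getD c []).length ≠ (d2.getD c []).length
    · rw [if_pos hbad]
      symm
      obtain ⟨c, hck, hcd2, hlen⟩ := hbad
      obtain ⟨p, hp, rfl⟩ := List.mem_map.mp hck
      have hget1 : d1.getD p.1 [] = p.2 := by
        have : (p.1, p.2) ∈ d1.items := by simpa using hp
        exact PySem.Dict.getD_of_mem_items d1 this h1 []
      have hsome : d2.get? p.1 ≠ none := by
        intro hn
        rw [PySem.Dict.get?_eq_none_iff_not_mem_keys] at hn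
        exact hn hcd2
      obtain ⟨ws, hws⟩ := Option.ne_none_iff_exists'.mp hsome
      have hget2 : d2.getD p.1 [] = ws := by
        rw [PySem.Dict.getD_eq_get?_getD, hws]; rfl
      rw [hget1, hget2] at hlen
      unfold dictEq
      apply Bool.and_eq_false_iff.mpr
      right
      apply List.all_eq_false.mpr
      refine ⟨(p.1, (p.2.length : Int)), ?_, ?_⟩
      · rw [bTable_items d1 h1]; exact List.mem_map_of_mem hp
      · simp [bTable_get? d2 h2, hws]
        omega
    · rw [if_neg hbad]
      have hAiff : ((0 + ((d1.keys.filter (fun c => decide (c ∈ d2.keys))).length : Int)) == (d1.size : Int)) = true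
          ↔ ∀ c ∈ d1.keys, c ∈ d2.keys := by
        rw [beq_iff_eq, zero_add]
        have hkl : d1.size = d1.keys.length := by simp [PySem.Dict.size, PySem.Dict.keys]
        rw [hkl, Int.natCast_inj, List.length_filter_eq_length_iff]
        simp
      have hBiff : dictEq (bTable d1) (bTable d2) = true ↔ ∀ c ∈ d1.keys, c ∈ d2.keys := by
        unfold dictEq
        rw [Bool.and_eq_true, bTable_all_iff d1 d2 h1 h2]
        constructor
        · rintro ⟨-, hall⟩ c hck
          obtain ⟨p, hp, rfl⟩ := List.mem_map.mp hck
          have := hall p hp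
          by_contra hmem
          rw [← PySem.Dict.get?_eq_none_iff_not_mem_keys] at hmem
          rw [hmem] at this
          simp at this
        · intro hk
          refine ⟨by simp [bTable_size d1 h1, bTable_size d2 h2, hsz], ?_⟩
          intro p hp
          have hck : p.1 ∈ d1.keys := by
            simp only [PySem.Dict.keys]; exact List.mem_map_of_mem hp
          have hcd2 := hk _ hck
          have hsome : d2.get? p.1 ≠ none := by
            intro hn
            rw [PySem.Dict.get?_eq_none_iff_not_mem_keys] at hn
            exact hn hcd2
          obtain ⟨ws, hws⟩ := Option.ne_none_iff_exists'.mp hsome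
          have hget1 : d1.getD p.1 [] = p.2 := by
            have : (p.1, p.2) ∈ d1.items := by simpa using hp
            exact PySem.Dict.getD_of_mem_items d1 this h1 []
          have hget2 : d2.getD p.1 [] = ws := by
            rw [PySem.Dict.getD_eq_get?_getD, hws]; rfl
          have hlen : (d1.getD p.1 []).length = (d2.getD p.1 []).length := by
            by_contra hne
            exact hbad ⟨p.1, hck, hcd2, hne⟩
          rw [hget1, hget2] at hlen
          simp [hws, hlen]
      rw [Bool.eq_iff_iff, hAiff, hBiff]
  · rw [if_pos (by simp [hsz])]
    symm
    unfold dictEq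
    apply Bool.and_eq_false_iff.mpr
    left
    simp [bTable_size d1 h1, bTable_size d2 h2, hsz]

-- ===== VERDICT (by name: the statement is the Claim_ definition above) =====
theorem are_equivalent_spec : Claim_equal_are_equivalent := by
  intro v1 v2 _
  unfold Spec_are_equivalent are_equivalent are_equivalent_alt
  exact main_eq (PySem.Dict.ofList v1) (PySem.Dict.ofList v2)
    (PySem.Dict.nodup_keys_ofList v1) (PySem.Dict.nodup_keys_ofList v2)
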